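-- pv_equiv track=rewrite | github.com/msv-lab/just-tri-it | src/viberate/syntactic_tri.py | check_tag
-- ===== SOURCE A (Python) =====
-- def check_tag(tag):
--     tag = tag.lower()
--     match tag:
--         case "int" | "float" | "bool" | "str":
--             return True
--         case _ if tag.startswith("list[") and tag.endswith("]"):
--             subtype = tag[5:-1].strip()
--             return check_tag(subtype)
--     return False
-- ===== SOURCE B (Python) =====
-- def check_tag(tag):
--     tag = tag.lower()
--     while tag.startswith("list[") and tag.endswith("]"):
--         tag = tag[5:-1].strip()
--     return tag in ("int", "float", "bool", "str")
-- ===== Notes on version B (the rewrite author's own statement) =====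
-- stated objective: simpler
-- what changed: Replaces A's recursion (base-type check first, then recurse into the stripped list[...] subtype) with a single while loop that peels all list[...] wrappers and then does one membership test on the remaining tag.
import Mathlib
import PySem

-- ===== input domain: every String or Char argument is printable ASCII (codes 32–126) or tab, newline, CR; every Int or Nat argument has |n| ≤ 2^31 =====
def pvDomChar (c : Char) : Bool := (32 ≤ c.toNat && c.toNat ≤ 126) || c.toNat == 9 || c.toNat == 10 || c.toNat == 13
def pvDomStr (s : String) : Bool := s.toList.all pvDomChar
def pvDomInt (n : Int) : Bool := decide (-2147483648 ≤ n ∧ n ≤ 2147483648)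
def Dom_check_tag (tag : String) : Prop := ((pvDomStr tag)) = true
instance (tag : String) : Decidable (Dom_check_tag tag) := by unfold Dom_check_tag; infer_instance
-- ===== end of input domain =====

-- B peels every `list[...]` wrapper in one loop and then does a single base-type
-- membership test, instead of A's recursive base-first check (objective: simpler).

-- termination helper, cited by both ports' decreasing_by
theorem pvShrink (cs : List Char) (h : PySem.Chars.startswith cs ("list[".toList) = true) :
    (PySem.Chars.strip (PySem.Chars.slice cs (some 5) (some (-1)))).length < cs.length := by
  have h5 : 5 ≤ cs.length := by
    have := (PySem.Chars.startswith_iff cs ("list[".toList)).1 h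
    simpa using this.length_le
  have hstrip : ∀ l : List Char, (PySem.Chars.strip l).length ≤ l.length := by
    intro l
    simp only [PySem.Chars.strip, PySem.Chars.rstrip, PySem.Chars.lstrip]
    have h1 := (List.dropWhile_sublist (p := PySem.Chars.isspace)
      (l := (List.dropWhile PySem.Chars.isspace l).reverse)).length_le
    have h2 := (List.dropWhile_sublist (p := PySem.Chars.isspace) (l := l)).length_le
    simp only [List.length_reverse] at *
    omega
  have hslice : (PySem.Chars.slice cs (some 5) (some (-1))).length < cs.length := by
    rw [PySem.Chars.slice_eq_listSlice, PySem.List.length_slice,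
      PySem.List.clampIdx_neg_one]
    have : PySem.List.clampIdx cs.length 5 = min 5 cs.length := by
      simp [PySem.List.clampIdx]
    omega
  exact lt_of_le_of_lt (hstrip _) hslice

-- ===== PORT A =====
def check_tag (tag : String) : Bool :=
  let t := PySem.Str.lower tag
  if t = "int" || t = "float" || t = "bool" || t = "str" then
    true
  else if PySem.Str.startswith t "list[" && PySem.Str.endswith t "]" then
    check_tag (PySem.Str.strip (PySem.Str.slice t (some 5) (some (-1))))
  else
    false
termination_by tag.toList.length
decreasing_by
  rename_i h
  rw [PySem.Str.toList_strip, PySem.Str.toList_slice]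
  have hsw := (Bool.and_eq_true .. ▸ h).1
  simp only [PySem.Str.startswith] at hsw
  have hd := pvShrink (PySem.Str.lower tag).toList hsw
  have hl : (PySem.Str.lower tag).toList.length = tag.toList.length := by
    simp [PySem.Str.toList_lower, PySem.Chars.lower]
  omega

-- ===== PORT B =====
-- the while loop of Source B: peel `list[...]` wrappers until the shape no longer matches
def pvPeel (cs : List Char) : List Char :=
  if PySem.Chars.startswith cs ("list[".toList) && PySem.Chars.endswith cs ("]".toList) then
    pvPeel (PySem.Chars.strip (PySem.Chars.slice cs (some 5) (some (-1))))
  else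
    cs
termination_by cs.length
decreasing_by
  rename_i h
  exact pvShrink cs (Bool.and_eq_true .. ▸ h).1

def check_tag_alt (tag : String) : Bool :=
  let t := pvPeel (PySem.Chars.lower tag.toList)
  t = "int".toList || t = "float".toList || t = "bool".toList || t = "str".toList

-- ===== PRECONDITION & SPEC =====
def Spec_check_tag (tag : String) (out : Bool) : Prop := out = check_tag_alt tag
instance (tag : String) (out : Bool) : Decidable (Spec_check_tag tag out) := by unfold Spec_check_tag; infer_instance

-- ===== CLAIM (what is proved, stated in full; the proofs are below) =====
def Claim_equal_check_tag : Prop := ∀ (tag : String), Dom_check_tag tag → Spec_check_tag tag (check_tag tag)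

-- ===== LEMMAS AND PROOFS =====

theorem pvOfNatToNat (n : Nat) (h : n < 0xd800) : (Char.ofNat n).toNat = n := by
  simp [Char.ofNat, Char.toNat, Char.ofNatAux, h, Nat.isValidChar]

theorem pvLeIff (a b : Char) : a ≤ b ↔ a.toNat ≤ b.toNat := Iff.rfl

theorem pvLowerCharIdem (c : Char) :
    PySem.Chars.lowerChar (PySem.Chars.lowerChar c) = PySem.Chars.lowerChar c := by
  simp only [PySem.Chars.lowerChar, PySem.Chars.isupper]
  split_ifs with h1 h2
  · exfalso
    simp only [Bool.and_eq_true, decide_eq_true_eq, pvLeIff] at h1 h2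
    have hA : ('A' : Char).toNat = 65 := rfl
    have hZ : ('Z' : Char).toNat = 90 := rfl
    rw [hA, hZ] at h1 h2
    rw [pvOfNatToNat (c.toNat + 32) (by omega)] at h2
    omega
  · rfl
  · rfl

theorem pvMemStrip {c : Char} {l : List Char} (h : c ∈ PySem.Chars.strip l) : c ∈ l := by
  simp only [PySem.Chars.strip, PySem.Chars.rstrip, PySem.Chars.lstrip] at h
  rw [List.mem_reverse] at h
  have h1 := (List.dropWhile_sublist (p := PySem.Chars.isspace)
    (l := (List.dropWhile PySem.Chars.isspace l).reverse)).mem h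
  rw [List.mem_reverse] at h1
  exact (List.dropWhile_sublist (p := PySem.Chars.isspace) (l := l)).mem h1

-- the peeled subtype of an already-lowercased string is again lowercase-fixed
theorem pvLowerFix (L : List Char) :
    PySem.Chars.lower (PySem.Chars.strip (PySem.Chars.slice (PySem.Chars.lower L) (some 5) (some (-1))))
      = PySem.Chars.strip (PySem.Chars.slice (PySem.Chars.lower L) (some 5) (some (-1))) := by
  unfold PySem.Chars.lower
  conv_rhs => rw [← List.map_id (PySem.Chars.strip (PySem.Chars.slice (List.map PySem.Chars.lowerChar L) (some 5) (some (-1))))]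
  apply List.map_congr_left
  intro c hc
  have h1 : c ∈ List.map PySem.Chars.lowerChar L := by
    have := PySem.List.mem_of_mem_slice (List.map PySem.Chars.lowerChar L) (some 5) (some (-1))
      (by rw [← PySem.Chars.slice_eq_listSlice]; exact pvMemStrip hc)
    exact this
  obtain ⟨d, _, rfl⟩ := List.mem_map.1 h1
  exact pvLowerCharIdem d

theorem pvStrEqIffToList (s t : String) : s = t ↔ s.toList = t.toList := by
  constructor
  · rintro rfl; rfl
  · intro h; exact String.ext (by simpa [String.toList] using h)

theorem pvPeelBase (b : List Char) (hb : PySem.Chars.startswith b ("list[".toList) = false) :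
    pvPeel b = b := by
  have hb' : PySem.Chars.startswith b ['l', 'i', 's', 't', '['] = false := hb
  rw [pvPeel, if_neg (by simp [hb'])]

theorem pvMain : ∀ (n : Nat) (tag : String), tag.toList.length = n →
    check_tag tag = check_tag_alt tag := by
  intro n
  induction n using Nat.strong_induction_on with
  | _ n ih =>
    intro tag hlen
    rw [check_tag]
    simp only [check_tag_alt]
    by_cases hbase : (PySem.Str.lower tag = "int" || PySem.Str.lower tag = "float" ||
        PySem.Str.lower tag = "bool" || PySem.Str.lower tag = "str") = true
    · rw [if_pos hbase]
      simp only [Bool.or_eq_true, pvStrEqIffToList, PySem.Str.toList_lower,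
        decide_eq_true_eq] at hbase
      rcases hbase with ((h | h) | h) | h <;>
        rw [h] <;> rw [pvPeelBase _ (by decide)] <;> simp
    · rw [if_neg hbase]
      by_cases hshape : (PySem.Str.startswith (PySem.Str.lower tag) "list[" &&
          PySem.Str.endswith (PySem.Str.lower tag) "]") = true
      · rw [if_pos hshape]
        have hshape' : (PySem.Chars.startswith (PySem.Chars.lower tag.toList) ("list[".toList) &&
            PySem.Chars.endswith (PySem.Chars.lower tag.toList) ("]".toList)) = true := by
          simp only [PySem.Str.startswith, PySem.Str.endswith, PySem.Str.toList_lower] at hshape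
          exact hshape
        rw [pvPeel, if_pos hshape']
        set s' := PySem.Str.strip (PySem.Str.slice (PySem.Str.lower tag) (some 5) (some (-1))) with hs'
        have htl : s'.toList = PySem.Chars.strip (PySem.Chars.slice (PySem.Chars.lower tag.toList)
            (some 5) (some (-1))) := by
          simp [hs', PySem.Str.toList_strip, PySem.Str.toList_slice, PySem.Str.toList_lower]
        have hlt : s'.toList.length < n := by
          have hd := pvShrink (PySem.Chars.lower tag.toList) (Bool.and_eq_true .. ▸ hshape').1
          have hll : (PySem.Chars.lower tag.toList).length = tag.toList.length := by
            simp [PySem.Chars.lower]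
          rw [htl]
          omega
        rw [ih _ hlt s' rfl]
        simp only [check_tag_alt]
        have harg : PySem.Chars.lower s'.toList = PySem.Chars.strip (PySem.Chars.slice
            (PySem.Chars.lower tag.toList) (some 5) (some (-1))) := by
          rw [htl]; exact pvLowerFix tag.toList
        rw [harg]
      · rw [if_neg hshape]
        have hshape' : ¬ (PySem.Chars.startswith (PySem.Chars.lower tag.toList) ("list[".toList) &&
            PySem.Chars.endswith (PySem.Chars.lower tag.toList) ("]".toList)) = true := by
          simp only [PySem.Str.startswith, PySem.Str.endswith, PySem.Str.toList_lower] at hshape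
          exact hshape
        rw [pvPeel, if_neg hshape']
        simp only [Bool.or_eq_true, pvStrEqIffToList, PySem.Str.toList_lower,
          decide_eq_true_eq] at hbase
        symm
        simp only [Bool.or_eq_false_iff, decide_eq_false_iff_not]
        tauto

-- ===== VERDICT (by name: the statement is the Claim_ definition above) =====
theorem check_tag_spec : Claim_equal_check_tag := by
  intro tag _
  unfold Spec_check_tag
  exact pvMain tag.toList.length tag rfl
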